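-- pv_equiv track=rewrite | github.com/zkan/codekata | pangram/pangram.py | count_alphabets
-- ===== SOURCE A (Python) =====
-- def count_alphabets(sentence):
--     result = {}
--     for each in sentence.lower():
--         if each.isalpha():
--             if each in result:
--                 result[each] += 1
--             else:
--                 result[each] = 1
--
--     return result
-- ===== SOURCE B (Python) =====
-- def count_alphabets(sentence):
--     low = sentence.lower()
--     return {c: low.count(c) for c in dict.fromkeys(low) if c.isalpha()}
-- ===== Notes on version B (the rewrite author's own statement) =====
-- stated objective: idiomatic
-- what changed: Replaces the accumulating per-character dict-update loop by a dict comprehension over the first-occurrence-distinct characters of the lowered string, counting each alphabetic key with str.count.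
import Mathlib
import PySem

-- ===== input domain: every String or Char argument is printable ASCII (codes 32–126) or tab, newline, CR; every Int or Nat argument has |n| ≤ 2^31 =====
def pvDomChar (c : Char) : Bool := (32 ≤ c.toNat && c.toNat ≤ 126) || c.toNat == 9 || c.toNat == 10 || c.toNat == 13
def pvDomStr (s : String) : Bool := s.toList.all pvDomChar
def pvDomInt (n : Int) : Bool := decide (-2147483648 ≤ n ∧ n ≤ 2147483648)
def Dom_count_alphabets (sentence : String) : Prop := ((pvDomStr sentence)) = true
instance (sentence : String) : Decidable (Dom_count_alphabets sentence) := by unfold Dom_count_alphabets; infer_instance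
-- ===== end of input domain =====

-- B replaces A's accumulating dict-update loop by a dict comprehension over the
-- first-occurrence-distinct characters of the lowered string (idiomatic; same result).


-- ===== PORT A =====
-- Keys are single-character Python strings; they are kept as Char while the dict is
-- built and rendered as one-character Strings when the dict is returned.
-- 'result[each] += 1' (only reached when 'each in result') is Dict.modify with default 0.
def count_alphabets (sentence : String) : List (String × Int) :=
  let result : PySem.Dict Char Int :=
    (PySem.Chars.lower sentence.toList).foldl (fun result each =>
      if PySem.Chars.strIsalpha [each] then
        if result.contains each then result.modify each 0 (· + 1)
        else result.insert each 1
      else result) PySem.Dict.empty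
  result.items.map (fun kv => (String.ofList [kv.1], kv.2))

-- ===== PORT B =====
-- {c: low.count(c) for c in dict.fromkeys(low) if c.isalpha()} : dict.fromkeys is
-- PySem.List.dedup; the comprehension's keys are distinct, so the dict IS this
-- association list in comprehension order (keys rendered as one-character Strings).
def count_alphabets_alt (sentence : String) : List (String × Int) :=
  let low := PySem.Chars.lower sentence.toList
  ((PySem.List.dedup low).filter (fun c => PySem.Chars.strIsalpha [c])).map
    (fun c => (String.ofList [c], (PySem.Chars.count low [c] : Int)))

-- ===== PRECONDITION & SPEC =====
def Spec_count_alphabets (sentence : String) (out : List (String × Int)) : Prop := out = count_alphabets_alt sentence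
instance (sentence : String) (out : List (String × Int)) : Decidable (Spec_count_alphabets sentence out) := by unfold Spec_count_alphabets; infer_instance

-- ===== CLAIM (what is proved, stated in full; the proofs are below) =====
def Claim_equal_count_alphabets : Prop := ∀ (sentence : String), Dom_count_alphabets sentence → Spec_count_alphabets sentence (count_alphabets sentence)

-- ===== LEMMAS AND PROOFS =====

-- Python's low.count(c) for a single character c is List.count.
theorem chars_count_go_singleton (c : Char) :
    ∀ (fuel : Nat) (s : List Char) (acc : Nat), s.length ≤ fuel →
      PySem.Chars.count.go [c] fuel s acc = acc + s.count c := by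
  intro fuel
  induction fuel with
  | zero =>
    intro s acc h
    cases s with
    | nil => simp [PySem.Chars.count.go]
    | cons x t => simp at h
  | succ n ih =>
    intro s acc h
    cases s with
    | nil => simp [PySem.Chars.count.go]
    | cons x t =>
      simp only [PySem.Chars.count.go]
      by_cases hx : x = c
      · subst hx
        simp only [List.isPrefixOf, beq_self_eq_true, Bool.and_true,
          List.length_singleton, List.drop_one, List.tail_cons, if_true]
        rw [ih t (acc + 1) (by simpa using Nat.le_of_succ_le_succ h)]
        simp
        omega
      · have hpre : ([c].isPrefixOf (x :: t)) = false := by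
          simp only [List.isPrefixOf, Bool.and_true]
          exact beq_eq_false_iff_ne.mpr (fun hbe => hx hbe.symm)
        rw [hpre]
        simp only [Bool.false_eq_true, if_false]
        rw [ih t acc (by simpa using Nat.le_of_succ_le_succ h)]
        simp [hx]

theorem chars_count_singleton (s : List Char) (c : Char) :
    PySem.Chars.count s [c] = s.count c := by
  simp only [PySem.Chars.count, List.isEmpty_cons, if_false, Bool.false_eq_true]
  simpa using chars_count_go_singleton c s.length s 0 (le_refl _)

-- Building the first-occurrence set commutes with filtering.
theorem foldl_add_filter (p : Char → Bool) :
    ∀ (xs acc : List Char),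
      (List.foldl PySem.Set.add acc xs).filter p
        = List.foldl (fun s x => if p x then PySem.Set.add s x else s) (acc.filter p) xs := by
  intro xs
  induction xs with
  | nil => intro acc; rfl
  | cons x t ih =>
    intro acc
    simp only [List.foldl_cons]
    rw [ih]
    congr 1
    by_cases hp : p x
    · by_cases hm : x ∈ acc
      · have hmf : x ∈ acc.filter p := List.mem_filter.mpr ⟨hm, hp⟩
        simp [PySem.Set.add, PySem.Set.contains, hm, hmf, hp]
      · have hmf : x ∉ acc.filter p := fun h => hm (List.mem_filter.mp h).1
        simp [PySem.Set.add, PySem.Set.contains, hm, hmf, hp, List.filter_append]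
    · have hp' : p x = false := by simpa using hp
      by_cases hm : x ∈ acc
      · simp [PySem.Set.add, PySem.Set.contains, hm, hp']
      · simp [PySem.Set.add, PySem.Set.contains, hm, hp', List.filter_append]

theorem ofList_filter (p : Char → Bool) (xs : List Char) :
    PySem.Set.ofList (xs.filter p) = (PySem.Set.ofList xs).filter p := by
  unfold PySem.Set.ofList
  rw [foldl_add_filter, List.foldl_filter]
  rfl

-- A's loop body is the Counter step on the alphabetic characters.
theorem step_eq_counter_step :
    (fun (result : PySem.Dict Char Int) each =>
      if PySem.Chars.strIsalpha [each] then
        if result.contains each then result.modify each 0 (· + 1)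
        else result.insert each 1
      else result)
    = (fun (d : PySem.Dict Char Int) x =>
        if PySem.Chars.strIsalpha [x] then d.modify x 0 (· + 1) else d) := by
  funext d x
  by_cases ha : PySem.Chars.strIsalpha [x]
  · simp only [ha, if_true]
    by_cases hc : d.contains x
    · simp [hc]
    · have hc' : ∀ a ∈ d.items, ¬ ((a.1 == x) = true) := by
        simp only [PySem.Dict.contains, List.any_eq_true, not_exists] at hc
        intro a ha' hbe
        exact hc a ⟨ha', hbe⟩
      have hg : d.get? x = none := by
        simp only [PySem.Dict.get?, Option.map_eq_none_iff, List.find?_eq_none]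
        exact hc'
      simp [hc, PySem.Dict.modify, PySem.Dict.getD, hg]
  · simp [ha]

theorem count_alphabets_eq (sentence : String) :
    count_alphabets sentence = count_alphabets_alt sentence := by
  unfold count_alphabets count_alphabets_alt
  simp only [step_eq_counter_step, ← List.foldl_filter (p := fun x => PySem.Chars.strIsalpha [x])]
  rw [show (List.foldl (fun (d : PySem.Dict Char Int) x => d.modify x 0 (· + 1)) PySem.Dict.empty
        ((PySem.Chars.lower sentence.toList).filter (fun x => PySem.Chars.strIsalpha [x])))
      = PySem.Dict.counter
          ((PySem.Chars.lower sentence.toList).filter (fun x => PySem.Chars.strIsalpha [x]))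
      from rfl]
  rw [PySem.Dict.items_counter]
  rw [List.map_map]
  rw [PySem.List.dedup, ofList_filter]
  apply List.map_congr_left
  intro c hc
  rw [← ofList_filter] at hc
  have hmem : c ∈ (PySem.Chars.lower sentence.toList).filter (fun x => PySem.Chars.strIsalpha [x]) :=
    (PySem.Set.mem_ofList _ _).mp hc
  have hp : PySem.Chars.strIsalpha [c] = true := (List.mem_filter.mp hmem).2
  simp only [Function.comp]
  rw [chars_count_singleton,
    List.count_filter (p := fun x => PySem.Chars.strIsalpha [x]) hp]

-- ===== VERDICT (by name: the statement is the Claim_ definition above) =====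
theorem count_alphabets_spec : Claim_equal_count_alphabets := by
  intro sentence _
  unfold Spec_count_alphabets
  exact count_alphabets_eq sentence
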